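-- pv_equiv track=rewrite | github.com/yachiterminal/yachiterminal | agent/oracle_content_generator.py | _format_recent_memories
-- ===== SOURCE A (Python) =====
-- from typing import Dict, List, Optional
--
-- def _format_recent_memories(context: Dict) -> str:
--     """Format recent memories for context"""
--     memories = context.get('recent_memories', {})
--     if not memories:
--         return "The void is empty of recent memories..."
--
--     formatted = []
--     for memory in memories:
--         if memory['type'] == 'interaction':
--             formatted.append(f"- Interaction with @{memory['user']}: {memory['content']}")
--         elif memory['type'] == 'prophecy':
--             formatted.append(f"- Previous Prophecy: {memory['content']}")
--
--     return "\n".join(formatted[-3:])  # Last 3 memories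
-- ===== SOURCE B (Python) =====
-- def _format_recent_memories(context):
--     """Format recent memories for context"""
--     memories = context.get('recent_memories', {})
--     if not memories:
--         return "The void is empty of recent memories..."
--
--     buf = []
--     for memory in reversed(memories):
--         if len(buf) == 3:
--             break
--         if memory['type'] == 'interaction':
--             buf.append(f"- Interaction with @{memory['user']}: {memory['content']}")
--         elif memory['type'] == 'prophecy':
--             buf.append(f"- Previous Prophecy: {memory['content']}")
--     buf.reverse()
--     return "\n".join(buf)
-- ===== Notes on version B (the rewrite author's own statement) =====
-- stated objective: alternative
-- what changed: B scans the memories back-to-front and stops as soon as 3 formatted entries are collected, then reverses the buffer, instead of A's full forward pass that formats every memory and slices the last 3 at the end.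
import Mathlib
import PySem

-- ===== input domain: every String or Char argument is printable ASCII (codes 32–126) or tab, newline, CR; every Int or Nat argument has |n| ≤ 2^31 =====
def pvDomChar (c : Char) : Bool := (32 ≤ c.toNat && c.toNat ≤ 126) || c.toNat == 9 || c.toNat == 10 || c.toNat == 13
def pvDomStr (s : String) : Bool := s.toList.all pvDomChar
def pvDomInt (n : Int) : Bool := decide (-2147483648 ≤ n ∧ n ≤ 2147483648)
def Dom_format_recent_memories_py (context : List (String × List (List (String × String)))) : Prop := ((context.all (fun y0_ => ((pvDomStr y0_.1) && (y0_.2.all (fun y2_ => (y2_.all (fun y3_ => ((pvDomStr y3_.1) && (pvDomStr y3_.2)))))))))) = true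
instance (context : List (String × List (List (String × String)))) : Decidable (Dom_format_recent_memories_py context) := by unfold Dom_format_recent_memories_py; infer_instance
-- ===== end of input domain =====

-- B iterates the memories in reverse with an early break after 3 formatted entries
-- instead of A's full forward pass sliced to its last 3; same value (alternative decomposition).
-- Ports use Dict.getD for the Python subscripts; Pre_ requires the subscripted keys to be present.

-- ===== PORT A =====
-- shared per-memory formatter: the if/elif body of both Python loops (none = no branch fires)
def pvFmt (memory : List (String × String)) : Option String :=
  if PySem.Dict.getD (PySem.Dict.mk memory) "type" "" = "interaction" then
    some ("- Interaction with @" ++ PySem.Dict.getD (PySem.Dict.mk memory) "user" ""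
          ++ ": " ++ PySem.Dict.getD (PySem.Dict.mk memory) "content" "")
  else if PySem.Dict.getD (PySem.Dict.mk memory) "type" "" = "prophecy" then
    some ("- Previous Prophecy: " ++ PySem.Dict.getD (PySem.Dict.mk memory) "content" "")
  else none

def format_recent_memories_py (context : List (String × List (List (String × String)))) : String :=
  let memories := PySem.Dict.getD (PySem.Dict.mk context) "recent_memories" []
  if memories = [] then "The void is empty of recent memories..."
  else
    let formatted := memories.foldl (fun acc memory =>
      match pvFmt memory with
      | some s => acc ++ [s]
      | none => acc) []
    PySem.Str.join "\n" (PySem.List.slice formatted (some (-3)) none)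

-- ===== PORT B =====
-- 'for memory in reversed(memories): if len(buf) == 3: break; …append…'
def pvAltLoop : List (List (String × String)) → List String → List String
  | [], buf => buf
  | memory :: rest, buf =>
    if buf.length = 3 then buf
    else
      match pvFmt memory with
      | some s => pvAltLoop rest (buf ++ [s])
      | none => pvAltLoop rest buf

def format_recent_memories_py_alt (context : List (String × List (List (String × String)))) : String :=
  let memories := PySem.Dict.getD (PySem.Dict.mk context) "recent_memories" []
  if memories = [] then "The void is empty of recent memories..."
  else
    PySem.Str.join "\n" (pvAltLoop memories.reverse []).reverse

-- ===== PRECONDITION & SPEC =====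
-- Pre_ excludes exactly the inputs where Python A raises KeyError: a memory without a 'type'
-- key, or an 'interaction'/'prophecy' memory missing the 'user'/'content' keys its f-string reads.
def Pre_format_recent_memories_py (context : List (String × List (List (String × String)))) : Prop :=
  ((PySem.Dict.getD (PySem.Dict.mk context) "recent_memories" []).all (fun m =>
    PySem.Dict.contains (PySem.Dict.mk m) "type" &&
    (if PySem.Dict.getD (PySem.Dict.mk m) "type" "" = "interaction" then
       PySem.Dict.contains (PySem.Dict.mk m) "user" && PySem.Dict.contains (PySem.Dict.mk m) "content"
     else if PySem.Dict.getD (PySem.Dict.mk m) "type" "" = "prophecy" then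
       PySem.Dict.contains (PySem.Dict.mk m) "content"
     else true))) = true
instance (context : List (String × List (List (String × String)))) : Decidable (Pre_format_recent_memories_py context) := by unfold Pre_format_recent_memories_py; infer_instance

def pvWitness_format_recent_memories_py : (List (String × List (List (String × String)))) :=
  [("recent_memories", [[("type", "interaction"), ("user", "u"), ("content", "c")],
                        [("type", "prophecy"), ("content", "p")]])]

def Spec_format_recent_memories_py (context : List (String × List (List (String × String)))) (out : String) : Prop := out = format_recent_memories_py_alt context
instance (context : List (String × List (List (String × String)))) (out : String) : Decidable (Spec_format_recent_memories_py context out) := by unfold Spec_format_recent_memories_py; infer_instance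

-- ===== CLAIM (what is proved, stated in full; the proofs are below) =====
def Claim_equal_format_recent_memories_py : Prop := ∀ (context : List (String × List (List (String × String)))), Dom_format_recent_memories_py context → Pre_format_recent_memories_py context → Spec_format_recent_memories_py context (format_recent_memories_py context)

-- ===== LEMMAS AND PROOFS =====

-- A's loop is the filterMap of pvFmt
theorem pvFoldl_eq_filterMap (l : List (List (String × String))) (acc : List String) :
    l.foldl (fun acc memory =>
      match pvFmt memory with
      | some s => acc ++ [s]
      | none => acc) acc = acc ++ l.filterMap pvFmt := by
  induction l generalizing acc with
  | nil => simp
  | cons m rest ih =>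
    cases h : pvFmt m with
    | none => simp [List.foldl_cons, h, ih]
    | some s => simp [List.foldl_cons, h, ih]

-- B's loop collects the first 3 formatted entries past buf
theorem pvAltLoop_eq_take (l : List (List (String × String))) (buf : List String)
    (h : buf.length ≤ 3) :
    pvAltLoop l buf = buf ++ (l.filterMap pvFmt).take (3 - buf.length) := by
  induction l generalizing buf with
  | nil => simp [pvAltLoop]
  | cons m rest ih =>
    by_cases hb : buf.length = 3
    · simp [pvAltLoop, hb]
    · have hlt : buf.length < 3 := lt_of_le_of_ne h hb
      cases hf : pvFmt m with
      | none => simp [pvAltLoop, hb, hf, ih buf h]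
      | some s =>
        have h1 : (buf ++ [s]).length ≤ 3 := by simp; omega
        have h2 : 3 - buf.length = (3 - (buf ++ [s]).length) + 1 := by simp; omega
        simp only [pvAltLoop, hb, if_false, ih (buf ++ [s]) h1, List.filterMap_cons, hf]
        rw [h2]
        simp [List.take_succ_cons]

theorem pvLast3 (l : List String) : l.drop (l.length - 3) = (l.reverse.take 3).reverse := by
  rw [List.take_reverse]; simp

-- ===== VERDICT (by name: the statement is the Claim_ definition above) =====
theorem format_recent_memories_py_spec : Claim_equal_format_recent_memories_py := by
  intro context _ _
  unfold Spec_format_recent_memories_py format_recent_memories_py format_recent_memories_py_alt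
  set memories := PySem.Dict.getD (PySem.Dict.mk context) "recent_memories" [] with hm
  by_cases he : memories = []
  · simp [he]
  · simp only [he, if_false]
    rw [pvFoldl_eq_filterMap, List.nil_append,
        PySem.List.slice_from_neg_ofNat _ 3 (by omega),
        pvAltLoop_eq_take memories.reverse [] (by simp)]
    rw [pvLast3]
    simp [List.filterMap_reverse]
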